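-- pv_equiv track=rewrite | github.com/antoinelemor/CCF-canadian-climate-framing | paper/CCF_Methodology/Results/Scripts/5_political_entities_front_page.py | normalize_person_name
-- ===== SOURCE A (Python) =====
-- def normalize_person_name(name: str) -> str:
--     """Normalize a person's name to group variants."""
--     # Remove extra spaces and capitalize
--     name = ' '.join(name.split()).title()
--
--     # Handle comma-separated names (keep first)
--     if ',' in name:
--         name = name.split(',')[0].strip()
--
--     # Handle concatenated names (keep first two words)
--     name_parts = name.split()
--     if len(name_parts) > 3:
--         name = ' '.join(name_parts[:2])
--
--     # Known name variants mapping (canonical name -> list of variants)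
--     replacements = {
--         'Justin Trudeau': ['J. Trudeau', 'Prime Minister Trudeau', 'PM Trudeau', 'Trudeau'],
--         'Pierre Poilievre': ['P. Poilievre', 'Poilievre'],
--         'Stephen Harper': ['S. Harper', 'Prime Minister Harper', 'PM Harper', 'Harper'],
--         'Donald Trump': ['D. Trump', 'President Trump', 'Trump'],
--         'Joe Biden': ['J. Biden', 'President Biden', 'Biden'],
--         'Kamala Harris': ['K. Harris', 'Vice President Harris', 'Harris'],
--         'Doug Ford': ['D. Ford', 'Premier Ford', 'Ford'],
--         'François Legault': ['F. Legault', 'Legault'],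
--         'Jason Kenney': ['J. Kenney', 'Kenney'],
--         'Rachel Notley': ['R. Notley', 'Notley'],
--         'Danielle Smith': ['D. Smith', 'Premier Smith', 'Smith'],
--         'Steven Guilbeault': ['S. Guilbeault', 'Guilbeault'],
--         'Catherine McKenna': ['C. Mckenna', 'Catherine Mckenna', 'Mckenna', 'McKenna'],
--         'Mark Carney': ['M. Carney', 'Carney'],
--         'Jagmeet Singh': ['J. Singh', 'Singh'],
--         'Elizabeth May': ['E. May', 'May'],
--         'John Rustad': ['J. Rustad', 'Rustad'],
--         'David Eby': ['D. Eby', 'Eby'],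
--         'Chrystia Freeland': ['C. Freeland', 'Freeland'],
--     }
--
--     # Check exact match first
--     name_lower = name.lower()
--     for canonical, variants in replacements.items():
--         variants_lower = [v.lower() for v in variants]
--         if name_lower in variants_lower or name_lower == canonical.lower():
--             return canonical
--
--     return name
-- ===== SOURCE B (Python) =====
-- _REPLACEMENTS = {
--     'Justin Trudeau': ['J. Trudeau', 'Prime Minister Trudeau', 'PM Trudeau', 'Trudeau'],
--     'Pierre Poilievre': ['P. Poilievre', 'Poilievre'],
--     'Stephen Harper': ['S. Harper', 'Prime Minister Harper', 'PM Harper', 'Harper'],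
--     'Donald Trump': ['D. Trump', 'President Trump', 'Trump'],
--     'Joe Biden': ['J. Biden', 'President Biden', 'Biden'],
--     'Kamala Harris': ['K. Harris', 'Vice President Harris', 'Harris'],
--     'Doug Ford': ['D. Ford', 'Premier Ford', 'Ford'],
--     'François Legault': ['F. Legault', 'Legault'],
--     'Jason Kenney': ['J. Kenney', 'Kenney'],
--     'Rachel Notley': ['R. Notley', 'Notley'],
--     'Danielle Smith': ['D. Smith', 'Premier Smith', 'Smith'],
--     'Steven Guilbeault': ['S. Guilbeault', 'Guilbeault'],
--     'Catherine McKenna': ['C. Mckenna', 'Catherine Mckenna', 'Mckenna', 'McKenna'],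
--     'Mark Carney': ['M. Carney', 'Carney'],
--     'Jagmeet Singh': ['J. Singh', 'Singh'],
--     'Elizabeth May': ['E. May', 'May'],
--     'John Rustad': ['J. Rustad', 'Rustad'],
--     'David Eby': ['D. Eby', 'Eby'],
--     'Chrystia Freeland': ['C. Freeland', 'Freeland'],
-- }
--
-- # Inverted index built once: lowercased canonical and every lowercased variant -> canonical.
-- _INDEX = {}
-- for _canonical, _variants in _REPLACEMENTS.items():
--     _INDEX[_canonical.lower()] = _canonical
--     for _v in _variants:
--         _INDEX[_v.lower()] = _canonical
--
--
-- def normalize_person_name(name: str) -> str: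
--     """Normalize a person's name to group variants."""
--     # One pass over the characters: collapse whitespace into word boundaries,
--     # title-case on the fly, and stop at the first comma.
--     words = []
--     cur = []
--     prev_alpha = False
--     for ch in name:
--         if ch == ',':
--             break
--         if ch.isspace():
--             if cur:
--                 words.append(''.join(cur))
--                 cur = []
--             prev_alpha = False
--         elif ch.isalpha():
--             cur.append(ch.lower() if prev_alpha else ch.upper())
--             prev_alpha = True
--         else:
--             cur.append(ch)
--             prev_alpha = False
--     if cur:
--         words.append(''.join(cur))
--     if len(words) > 3:
--         words = words[:2]
--     key = ' '.join(words)
--     return _INDEX.get(key.lower(), key)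
-- ===== Notes on version B (the rewrite author's own statement) =====
-- stated objective: alternative
-- what changed: A's five staged passes (whitespace split + join, whole-string title(), comma split + strip, re-split and truncate) followed by a per-call nested scan of the variants table are replaced by a single left-to-right character state machine that builds the title-cased word list in one pass (stopping at the first comma) plus one lookup in an inverted index built once at module load.
import Mathlib
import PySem

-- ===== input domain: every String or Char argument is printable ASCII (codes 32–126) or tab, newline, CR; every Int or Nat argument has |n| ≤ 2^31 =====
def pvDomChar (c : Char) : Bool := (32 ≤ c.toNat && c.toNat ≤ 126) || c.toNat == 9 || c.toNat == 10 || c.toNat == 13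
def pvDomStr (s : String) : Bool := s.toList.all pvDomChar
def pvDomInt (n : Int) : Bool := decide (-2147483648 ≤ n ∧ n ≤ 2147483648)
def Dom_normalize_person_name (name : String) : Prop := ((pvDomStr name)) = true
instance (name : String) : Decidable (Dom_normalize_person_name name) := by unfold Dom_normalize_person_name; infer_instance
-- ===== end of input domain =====

-- B fuses A's staged pipeline (split/join, whole-string title(), comma split, strip, re-split)
-- into ONE character-level state machine that builds the word list directly, then consults an
-- inverted index built once; objective: alternative (same result, different algorithm).

-- hand port of Python str.title(), exact on ASCII (a char is "cased" iff it is an ASCII letter);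
-- PySem has no title primitive; used by A (A titles the whole joined string at once).
def pvTitleGo : List Char → Bool → List Char
  | [], _ => []
  | c :: rest, prevCased =>
    if PySem.Chars.isalpha c then
      (if prevCased then PySem.Chars.lowerChar c else PySem.Chars.upperChar c) :: pvTitleGo rest true
    else
      c :: pvTitleGo rest false

def pvTitle (s : String) : String := String.ofList (pvTitleGo s.toList false)

-- the replacements table (identical literal in both Pythons: a local dict in A, module constant in B)
def pvRepl : List (String × List String) :=
  [ ("Justin Trudeau", ["J. Trudeau", "Prime Minister Trudeau", "PM Trudeau", "Trudeau"]),
    ("Pierre Poilievre", ["P. Poilievre", "Poilievre"]),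
    ("Stephen Harper", ["S. Harper", "Prime Minister Harper", "PM Harper", "Harper"]),
    ("Donald Trump", ["D. Trump", "President Trump", "Trump"]),
    ("Joe Biden", ["J. Biden", "President Biden", "Biden"]),
    ("Kamala Harris", ["K. Harris", "Vice President Harris", "Harris"]),
    ("Doug Ford", ["D. Ford", "Premier Ford", "Ford"]),
    ("François Legault", ["F. Legault", "Legault"]),
    ("Jason Kenney", ["J. Kenney", "Kenney"]),
    ("Rachel Notley", ["R. Notley", "Notley"]),
    ("Danielle Smith", ["D. Smith", "Premier Smith", "Smith"]),
    ("Steven Guilbeault", ["S. Guilbeault", "Guilbeault"]),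
    ("Catherine McKenna", ["C. Mckenna", "Catherine Mckenna", "Mckenna", "McKenna"]),
    ("Mark Carney", ["M. Carney", "Carney"]),
    ("Jagmeet Singh", ["J. Singh", "Singh"]),
    ("Elizabeth May", ["E. May", "May"]),
    ("John Rustad", ["J. Rustad", "Rustad"]),
    ("David Eby", ["D. Eby", "Eby"]),
    ("Chrystia Freeland", ["C. Freeland", "Freeland"]) ]

-- ===== PORT A =====
-- A's for-loop with early return: scan the table, first canonical whose lowered variants
-- (or lowered canonical) match returns it; none = fall through to 'return name'.
def pvScanA (nl : String) : List (String × List String) → Option String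
  | [] => none
  | (c, vs) :: rest =>
    if (vs.map PySem.Str.lower).contains nl || nl == PySem.Str.lower c then some c
    else pvScanA nl rest

-- A's return-inside-for: Option-valued scan, then 'return canonical' / fall-through 'return name'
def pvLookupA (nm : String) : String :=
  match pvScanA (PySem.Str.lower nm) pvRepl with
  | some c => c
  | none => nm

def normalize_person_name (name : String) : String :=
  let name1 := pvTitle (PySem.Str.join " " (PySem.Str.split₀ name))
  -- name.split(',')[0]: split with a nonempty separator is never empty, so [0] is the head
  let name2 := if PySem.Str.isIn "," name1 then
      PySem.Str.strip (((PySem.Str.split? name1 ",").getD []).headD "") else name1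
  let parts := PySem.Str.split₀ name2
  let name3 := if parts.length > 3 then PySem.Str.join " " (parts.take 2) else name2
  pvLookupA name3

-- ===== PORT B =====
-- the inverted index, built once by B's module-level loop (lowered key -> canonical)
def pvIndex : PySem.Dict String String :=
  pvRepl.foldl
    (fun d p => p.2.foldl (fun d v => d.insert (PySem.Str.lower v) p.1)
                  (d.insert (PySem.Str.lower p.1) p.1))
    PySem.Dict.empty

-- Source B's single loop over the characters: words accumulated left to right, cur = the word being
-- built (already title-cased), prev = "previous char was a letter"; a comma stops the loop.
def pvMachine : List Char → List Char → Bool → List (List Char)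
  | [], cur, _ => if cur.isEmpty then [] else [cur]
  | c :: rest, cur, prev =>
    if c = ',' then (if cur.isEmpty then [] else [cur])
    else if PySem.Chars.isspace c then
      (if cur.isEmpty then pvMachine rest [] false else cur :: pvMachine rest [] false)
    else if PySem.Chars.isalpha c then
      pvMachine rest (cur ++ [if prev then PySem.Chars.lowerChar c else PySem.Chars.upperChar c]) true
    else
      pvMachine rest (cur ++ [c]) false

def normalize_person_name_alt (name : String) : String :=
  let ws := pvMachine name.toList [] false
  let ws2 := if ws.length > 3 then ws.take 2 else ws
  let key := String.ofList (PySem.Chars.join [' '] ws2)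
  PySem.Dict.getD pvIndex (PySem.Str.lower key) key

-- ===== PRECONDITION & SPEC =====
def Spec_normalize_person_name (name : String) (out : String) : Prop := out = normalize_person_name_alt name
instance (name : String) (out : String) : Decidable (Spec_normalize_person_name name out) := by unfold Spec_normalize_person_name; infer_instance

-- ===== CLAIM (what is proved, stated in full; the proofs are below) =====
def Claim_equal_normalize_person_name : Prop := ∀ (name : String), Dom_normalize_person_name name → Spec_normalize_person_name name (normalize_person_name name)

-- ===== LEMMAS AND PROOFS =====

-- proof-only helpers ---------------------------------------------------------

-- one title-cased character (what both title routines do to char c after a char of casedness b)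
def pvTC (c : Char) (b : Bool) : Char :=
  if PySem.Chars.isalpha c then (if b then PySem.Chars.lowerChar c else PySem.Chars.upperChar c) else c

-- the title-case state after reading u starting from state p
def pvSt (u : List Char) (p : Bool) : Bool := u.foldl (fun _ c => PySem.Chars.isalpha c) p

-- title-case one word
def pvT (w : List Char) : List Char := pvTitleGo w false

-- pvMachine minus its comma branch
def pvNC : List Char → List Char → Bool → List (List Char)
  | [], cur, _ => if cur.isEmpty then [] else [cur]
  | c :: rest, cur, prev =>
    if PySem.Chars.isspace c then
      (if cur.isEmpty then pvNC rest [] false else cur :: pvNC rest [] false)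
    else pvNC rest (cur ++ [pvTC c prev]) (PySem.Chars.isalpha c)

-- a word produced by str.split(): nonempty and whitespace-free
def pvGood (w : List Char) : Prop := w ≠ [] ∧ ∀ c ∈ w, PySem.Chars.isspace c = false

-- comma-cutting on a word list: words before the first word containing a comma,
-- plus that word's nonempty part before its comma
def pvFcut : List (List Char) → List (List Char)
  | [] => []
  | w :: rest =>
    if ',' ∈ w then
      (if w.takeWhile (fun c => c != ',') = [] then [] else [w.takeWhile (fun c => c != ',')])
    else w :: pvFcut rest

-- every lowered key the table mentions
def pvKeys : List String := pvRepl.flatMap (fun p => PySem.Str.lower p.1 :: p.2.map PySem.Str.lower)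

-- character-level facts ------------------------------------------------------

lemma pv_char_le (a b : Char) : a ≤ b ↔ a.toNat ≤ b.toNat := by
  rw [Char.le_def]; exact UInt32.le_iff_toNat_le

lemma pv_char_eq (c d : Char) : c = d ↔ c.toNat = d.toNat := by
  constructor
  · intro h; rw [h]
  · intro h; apply Char.ext; unfold Char.toNat at h; exact UInt32.toNat_inj.mp h

lemma pv_isupper_iff (c : Char) : PySem.Chars.isupper c = true ↔ (65 ≤ c.toNat ∧ c.toNat ≤ 90) := by
  simp only [PySem.Chars.isupper, Bool.and_eq_true, decide_eq_true_eq, pv_char_le]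
  rw [show ('A'.toNat) = 65 from rfl, show ('Z'.toNat) = 90 from rfl]

lemma pv_islower_iff (c : Char) : PySem.Chars.islower c = true ↔ (97 ≤ c.toNat ∧ c.toNat ≤ 122) := by
  simp only [PySem.Chars.islower, Bool.and_eq_true, decide_eq_true_eq, pv_char_le]
  rw [show ('a'.toNat) = 97 from rfl, show ('z'.toNat) = 122 from rfl]

lemma pv_lowerChar_toNat (c : Char) (h : PySem.Chars.isupper c = true) :
    (PySem.Chars.lowerChar c).toNat = c.toNat + 32 := by
  obtain ⟨h1, h2⟩ := (pv_isupper_iff c).mp h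
  simp only [PySem.Chars.lowerChar, h, if_pos]
  rw [Char.toNat_ofNat, if_pos]
  exact Or.inl (by omega)

lemma pv_upperChar_toNat (c : Char) (h : PySem.Chars.islower c = true) :
    (PySem.Chars.upperChar c).toNat = c.toNat - 32 := by
  obtain ⟨h1, h2⟩ := (pv_islower_iff c).mp h
  simp only [PySem.Chars.upperChar, h, if_pos]
  rw [Char.toNat_ofNat, if_pos]
  exact Or.inl (by omega)

lemma pv_alpha_toNat (c : Char) (h : PySem.Chars.isalpha c = true) :
    (65 ≤ c.toNat ∧ c.toNat ≤ 90) ∨ (97 ≤ c.toNat ∧ c.toNat ≤ 122) := by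
  simp only [PySem.Chars.isalpha, Bool.or_eq_true] at h
  rcases h with h | h
  · exact Or.inl ((pv_isupper_iff c).mp h)
  · exact Or.inr ((pv_islower_iff c).mp h)

lemma pvTC_range (c : Char) (b : Bool) (h : PySem.Chars.isalpha c = true) :
    65 ≤ (pvTC c b).toNat ∧ (pvTC c b).toNat ≤ 122 := by
  have ha := h
  simp only [PySem.Chars.isalpha, Bool.or_eq_true] at ha
  simp only [pvTC, h, if_pos]
  rcases ha with hu | hl
  · obtain ⟨h1, h2⟩ := (pv_isupper_iff c).mp hu
    cases b
    · simp only [Bool.false_eq_true, if_false]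
      rw [PySem.Chars.upperChar]
      have hl' : PySem.Chars.islower c = false := by
        rw [Bool.eq_false_iff]; intro hc; obtain ⟨h3, _⟩ := (pv_islower_iff c).mp hc; omega
      rw [hl']
      simp only [Bool.false_eq_true, if_false]
      omega
    · simp only [if_true, pv_lowerChar_toNat c hu]
      omega
  · obtain ⟨h1, h2⟩ := (pv_islower_iff c).mp hl
    cases b
    · simp only [Bool.false_eq_true, if_false]
      rw [pv_upperChar_toNat c hl]
      omega
    · simp only [if_true]
      rw [PySem.Chars.lowerChar]
      have hu' : PySem.Chars.isupper c = false := by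
        rw [Bool.eq_false_iff]; intro hc; obtain ⟨h3, _⟩ := (pv_isupper_iff c).mp hc; omega
      rw [hu']
      simp only [Bool.false_eq_true, if_false]
      omega

lemma pv_nonspace_of_range (c : Char) (h1 : 65 ≤ c.toNat) (h2 : c.toNat ≤ 122) :
    PySem.Chars.isspace c = false := by
  simp only [PySem.Chars.isspace, Bool.or_eq_false_iff, Bool.and_eq_false_iff,
    decide_eq_false_iff_not]
  omega

lemma pvTC_isspace (c : Char) (b : Bool) :
    PySem.Chars.isspace (pvTC c b) = PySem.Chars.isspace c := by
  by_cases h : PySem.Chars.isalpha c = true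
  · obtain ⟨h1, h2⟩ := pvTC_range c b h
    rcases pv_alpha_toNat c h with ⟨h3, h4⟩ | ⟨h3, h4⟩ <;>
      rw [pv_nonspace_of_range _ h1 h2, pv_nonspace_of_range c (by omega) (by omega)]
  · simp [pvTC, h]

lemma pvTC_comma (c : Char) (b : Bool) : pvTC c b = ',' ↔ c = ',' := by
  by_cases h : PySem.Chars.isalpha c = true
  · obtain ⟨h1, h2⟩ := pvTC_range c b h
    rcases pv_alpha_toNat c h with ⟨h3, h4⟩ | ⟨h3, h4⟩ <;>
      constructor <;> intro hc <;>
        [skip; skip; skip; skip] <;>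
          (rw [pv_char_eq] at hc; rw [show (','.toNat) = 44 from rfl] at hc; omega)
  · simp [pvTC, h]

-- title-case facts -----------------------------------------------------------

lemma pvTitleGo_cons (c : Char) (u : List Char) (p : Bool) :
    pvTitleGo (c :: u) p = pvTC c p :: pvTitleGo u (PySem.Chars.isalpha c) := by
  by_cases h : PySem.Chars.isalpha c = true <;> simp [pvTitleGo, pvTC, h]

lemma pvTitleGo_eq_nil_iff (u : List Char) (p : Bool) : pvTitleGo u p = [] ↔ u = [] := by
  cases u with
  | nil => simp [pvTitleGo]
  | cons c rest => rw [pvTitleGo_cons]; simp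

lemma pvSt_cons (c : Char) (u : List Char) (p : Bool) :
    pvSt (c :: u) p = pvSt u (PySem.Chars.isalpha c) := rfl

lemma pvTitleGo_append (u v : List Char) (p : Bool) :
    pvTitleGo (u ++ v) p = pvTitleGo u p ++ pvTitleGo v (pvSt u p) := by
  induction u generalizing p with
  | nil => simp [pvTitleGo, pvSt]
  | cons c rest ih => simp [pvTitleGo_cons, pvSt_cons, ih]

lemma pvSt_snoc (u : List Char) (c : Char) (p : Bool) :
    pvSt (u ++ [c]) p = PySem.Chars.isalpha c := by
  simp [pvSt, List.foldl_append]

lemma pvTitleGo_snoc (u : List Char) (c : Char) (p : Bool) :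
    pvTitleGo (u ++ [c]) p = pvTitleGo u p ++ [pvTC c (pvSt u p)] := by
  rw [pvTitleGo_append, pvTitleGo_cons]; simp [pvTitleGo]

lemma pvTitleGo_space (u v : List Char) (p : Bool) :
    pvTitleGo (u ++ ' ' :: v) p = pvTitleGo u p ++ ' ' :: pvTitleGo v false := by
  rw [pvTitleGo_append, pvTitleGo_cons]
  have h : PySem.Chars.isalpha ' ' = false := by decide
  simp [pvTC, h]

lemma pvTitleGo_mem_comma (u : List Char) (p : Bool) : ',' ∈ pvTitleGo u p ↔ ',' ∈ u := by
  induction u generalizing p with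
  | nil => simp [pvTitleGo]
  | cons c rest ih =>
    rw [pvTitleGo_cons]
    simp only [List.mem_cons, ih]
    constructor
    · rintro (h | h)
      · exact Or.inl ((pvTC_comma c p).mp h.symm).symm
      · exact Or.inr h
    · rintro (h | h)
      · exact Or.inl ((pvTC_comma c p).mpr h.symm).symm
      · exact Or.inr h

lemma pvTitleGo_takeWhile (u : List Char) (p : Bool) :
    (pvTitleGo u p).takeWhile (fun c => c != ',') = pvTitleGo (u.takeWhile (fun c => c != ',')) p := by
  induction u generalizing p with
  | nil => simp [pvTitleGo]
  | cons c rest ih =>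
    rw [pvTitleGo_cons]
    by_cases h : c = ','
    · subst h
      have h1 : pvTC ',' p = ',' := (pvTC_comma ',' p).mpr rfl
      simp [h1, List.takeWhile, pvTitleGo]
    · have h1 : (pvTC c p != ',') = true := by
        simp only [bne_iff_ne, ne_eq]
        exact fun hc => h ((pvTC_comma c p).mp hc)
      have h2 : (c != ',') = true := by simp only [bne_iff_ne, ne_eq]; exact h
      rw [List.takeWhile_cons, List.takeWhile_cons, h1, h2]
      simp only [if_true]
      rw [ih, pvTitleGo_cons]

lemma pvT_mem (c' : Char) (u : List Char) (p : Bool) (h : c' ∈ pvTitleGo u p) :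
    ∃ c ∈ u, ∃ b, c' = pvTC c b := by
  induction u generalizing p with
  | nil => simp [pvTitleGo] at h
  | cons c rest ih =>
    rw [pvTitleGo_cons] at h
    rcases List.mem_cons.mp h with h | h
    · exact ⟨c, List.mem_cons_self .., p, h⟩
    · obtain ⟨d, hd, b, hb⟩ := ih _ h
      exact ⟨d, List.mem_cons_of_mem _ hd, b, hb⟩

lemma pvGood_pvT (w : List Char) (h : pvGood w) : pvGood (pvT w) := by
  constructor
  · intro hc; exact h.1 ((pvTitleGo_eq_nil_iff w false).mp hc)
  · intro c hc
    obtain ⟨d, hd, b, hb⟩ := pvT_mem c w false hc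
    rw [hb, pvTC_isspace]
    exact h.2 d hd

-- split₀.go facts ------------------------------------------------------------

lemma pv_split_go_acc (s cur : List Char) (acc : List (List Char)) :
    PySem.Chars.split₀.go s cur acc = acc.reverse ++ PySem.Chars.split₀.go s cur [] := by
  induction s generalizing cur acc with
  | nil =>
    rw [PySem.Chars.split₀.go]
    conv_rhs => rw [PySem.Chars.split₀.go]
    by_cases hc : cur.isEmpty = true <;> simp [hc]
  | cons c rest ih =>
    rw [PySem.Chars.split₀.go]
    conv_rhs => rw [PySem.Chars.split₀.go]
    by_cases hs : PySem.Chars.isspace c = true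
    · by_cases hc : cur.isEmpty = true
      · simp only [hs, hc, if_true]
        exact ih [] acc
      · simp only [hs, hc, if_true, Bool.false_eq_true, if_false]
        rw [ih [] (cur.reverse :: acc), ih [] [cur.reverse]]
        simp
    · simp only [hs, Bool.false_eq_true, if_false]
      exact ih (c :: cur) acc

lemma pv_split_go_good (s cur : List Char) (hcur : ∀ c ∈ cur, PySem.Chars.isspace c = false) :
    ∀ w ∈ PySem.Chars.split₀.go s cur [], pvGood w := by
  induction s generalizing cur with
  | nil =>
    rw [PySem.Chars.split₀.go]
    by_cases hc : cur.isEmpty = true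
    · simp [hc]
    · simp only [hc, Bool.false_eq_true, if_false]
      intro w hw
      simp only [List.reverse_cons, List.reverse_nil, List.nil_append, List.mem_singleton] at hw
      subst hw
      refine ⟨by simpa using (List.isEmpty_eq_false_iff.mp (by simp [hc])), ?_⟩
      intro d hd
      exact hcur d (List.mem_reverse.mp hd)
  | cons c rest ih =>
    rw [PySem.Chars.split₀.go]
    by_cases hs : PySem.Chars.isspace c = true
    · by_cases hc : cur.isEmpty = true
      · simp only [hs, hc, if_true]
        exact ih [] (by simp)
      · simp only [hs, hc, if_true, Bool.false_eq_true, if_false]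
        rw [pv_split_go_acc]
        intro w hw
        simp only [List.reverse_cons, List.reverse_nil, List.nil_append] at hw
        rcases List.mem_append.mp hw with hw | hw
        · simp only [List.mem_singleton] at hw
          subst hw
          refine ⟨by simpa using (List.isEmpty_eq_false_iff.mp (by simp [hc])), ?_⟩
          intro d hd
          exact hcur d (List.mem_reverse.mp hd)
        · exact ih [] (by simp) w hw
    · simp only [hs, Bool.false_eq_true, if_false]
      refine ih (c :: cur) ?_
      intro d hd
      rcases List.mem_cons.mp hd with hd | hd
      · subst hd; exact Bool.eq_false_iff.mpr hs
      · exact hcur d hd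

lemma pv_split_good (u : List Char) : ∀ w ∈ PySem.Chars.split₀ u, pvGood w := by
  exact pv_split_go_good u [] (by simp)

lemma pv_comma_mem_join (l : List (List Char)) :
    ',' ∈ PySem.Chars.join [' '] l ↔ ∃ w ∈ l, ',' ∈ w := by
  induction l with
  | nil => simp [PySem.Chars.join_nil]
  | cons w rest ih =>
    cases rest with
    | nil => simp [PySem.Chars.join_singleton]
    | cons v rest' =>
      rw [PySem.Chars.join_cons_cons]
      simp only [List.mem_append, ih, List.mem_singleton]
      constructor
      · rintro ((h | h) | h)
        · exact ⟨w, List.mem_cons_self .., h⟩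
        · exact absurd h (by decide)
        · obtain ⟨x, hx, hcx⟩ := h
          exact ⟨x, List.mem_cons_of_mem _ hx, hcx⟩
      · rintro ⟨x, hx, hcx⟩
        rcases List.mem_cons.mp hx with hx | hx
        · subst hx; exact Or.inl (Or.inl hcx)
        · exact Or.inr ⟨x, hx, hcx⟩

lemma pv_title_join (l : List (List Char)) :
    pvTitleGo (PySem.Chars.join [' '] l) false = PySem.Chars.join [' '] (l.map pvT) := by
  induction l with
  | nil => simp [PySem.Chars.join_nil, pvTitleGo]
  | cons w rest ih =>
    cases rest with
    | nil => simp [PySem.Chars.join_singleton, pvT]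
    | cons v rest' =>
      rw [PySem.Chars.join_cons_cons, List.map_cons, List.map_cons,
        PySem.Chars.join_cons_cons, ← List.map_cons (f := pvT) (a := v) (l := rest')]
      have h1 : w ++ [' '] ++ PySem.Chars.join [' '] (v :: rest')
          = w ++ ' ' :: PySem.Chars.join [' '] (v :: rest') := by simp
      rw [h1, pvTitleGo_space, ih]
      simp [pvT]

lemma pv_split_go_consume (w t cur : List Char) (hw : ∀ c ∈ w, PySem.Chars.isspace c = false) :
    PySem.Chars.split₀.go (w ++ t) cur [] = PySem.Chars.split₀.go t (w.reverse ++ cur) [] := by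
  induction w generalizing cur with
  | nil => simp
  | cons c w' ih =>
    have hc : PySem.Chars.isspace c = false := hw c (List.mem_cons_self ..)
    rw [List.cons_append, PySem.Chars.split₀.go]
    simp only [hc, Bool.false_eq_true, if_false]
    rw [ih _ (fun d hd => hw d (List.mem_cons_of_mem _ hd))]
    simp

lemma pv_split_join (l : List (List Char)) (h : ∀ w ∈ l, pvGood w) :
    PySem.Chars.split₀ (PySem.Chars.join [' '] l) = l := by
  induction l with
  | nil =>
    rw [PySem.Chars.join_nil, PySem.Chars.split₀, PySem.Chars.split₀.go]
    simp
  | cons w rest ih =>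
    obtain ⟨hne, hns⟩ := h w (List.mem_cons_self ..)
    have hrev : w.reverse.isEmpty = false := by
      simp [List.isEmpty_eq_false_iff, hne]
    cases rest with
    | nil =>
      rw [PySem.Chars.join_singleton, PySem.Chars.split₀]
      rw [show w = w ++ [] from (List.append_nil w).symm, pv_split_go_consume w [] [] hns]
      rw [PySem.Chars.split₀.go]
      simp [hrev]
    | cons v rest' =>
      rw [PySem.Chars.join_cons_cons, PySem.Chars.split₀]
      have h1 : w ++ [' '] ++ PySem.Chars.join [' '] (v :: rest')
          = w ++ ' ' :: PySem.Chars.join [' '] (v :: rest') := by simp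
      rw [h1, pv_split_go_consume w _ [] hns, PySem.Chars.split₀.go]
      have hsp : PySem.Chars.isspace ' ' = true := by decide
      simp only [hsp, if_true, List.append_nil, hrev, Bool.false_eq_true, if_false]
      rw [pv_split_go_acc]
      have ih' := ih (fun x hx => h x (List.mem_cons_of_mem _ hx))
      rw [PySem.Chars.split₀] at ih'
      rw [ih']
      simp

-- machine facts --------------------------------------------------------------

lemma pvMachine_eq_pvNC (s cur : List Char) (prev : Bool) :
    pvMachine s cur prev = pvNC (s.takeWhile (fun c => c != ',')) cur prev := by
  induction s generalizing cur prev with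
  | nil => rfl
  | cons c rest ih =>
    by_cases hc : c = ','
    · subst hc
      rw [List.takeWhile_cons]
      simp only [bne_self_eq_false, Bool.false_eq_true, if_false]
      simp [pvMachine, pvNC]
    · have hq : (c != ',') = true := by simp [bne_iff_ne, hc]
      rw [List.takeWhile_cons, hq]
      simp only [if_true]
      by_cases hs : PySem.Chars.isspace c = true
      · simp only [pvMachine, pvNC, hc, if_false, hs, if_true, ih]
      · by_cases ha : PySem.Chars.isalpha c = true
        · simp only [pvMachine, pvNC, hc, if_false, hs, Bool.false_eq_true, ha, if_true, ih,
            pvTC]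
        · simp only [pvMachine, pvNC, hc, if_false, hs, Bool.false_eq_true, ha, ih, pvTC]

lemma pvNC_eq_go (s rcur : List Char) :
    pvNC s (pvTitleGo rcur.reverse false) (pvSt rcur.reverse false)
      = (PySem.Chars.split₀.go s rcur []).map pvT := by
  induction s generalizing rcur with
  | nil =>
    rw [PySem.Chars.split₀.go]
    by_cases hc : rcur.isEmpty = true
    · rw [List.isEmpty_iff] at hc
      subst hc
      simp [pvNC, pvTitleGo]
    · have hne : rcur ≠ [] := by simpa [List.isEmpty_iff] using hc
      have htne : pvTitleGo rcur.reverse false ≠ [] := by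
        rw [ne_eq, pvTitleGo_eq_nil_iff]
        simp [hne]
      simp only [pvNC, List.isEmpty_eq_false_iff.mpr htne, Bool.false_eq_true, if_false, hc,
        List.reverse_cons, List.reverse_nil, List.nil_append, List.map_cons, List.map_nil]
      rfl
  | cons c rest ih =>
    rw [PySem.Chars.split₀.go]
    by_cases hs : PySem.Chars.isspace c = true
    · have hTC : PySem.Chars.isspace (pvTC c true) = true := by rw [pvTC_isspace]; exact hs
      by_cases hc : rcur.isEmpty = true
      · rw [List.isEmpty_iff] at hc
        subst hc
        simp only [pvNC, List.reverse_nil, pvTitleGo, List.isEmpty_nil, if_true, hs]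
        exact ih []
      · have hne : rcur ≠ [] := by simpa [List.isEmpty_iff] using hc
        have htne : pvTitleGo rcur.reverse false ≠ [] := by
          rw [ne_eq, pvTitleGo_eq_nil_iff]
          simp [hne]
        simp only [pvNC, hs, if_true, List.isEmpty_eq_false_iff.mpr htne, Bool.false_eq_true,
          if_false, hc]
        rw [pv_split_go_acc, List.map_append]
        have ih0 := ih []
        simp only [List.reverse_nil, pvTitleGo] at ih0
        rw [show pvSt ([] : List Char) false = false from rfl] at ih0
        rw [ih0]
        simp [pvT]
    · simp only [pvNC, hs, Bool.false_eq_true, if_false]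
      have h1 : pvTitleGo rcur.reverse false ++ [pvTC c (pvSt rcur.reverse false)]
          = pvTitleGo ((c :: rcur).reverse) false := by
        rw [List.reverse_cons, pvTitleGo_snoc]
      have h2 : PySem.Chars.isalpha c = pvSt ((c :: rcur).reverse) false := by
        rw [List.reverse_cons, pvSt_snoc]
      rw [h1, h2]
      exact ih (c :: rcur)

lemma pvMachine_spec (cs : List Char) :
    pvMachine cs [] false = (PySem.Chars.split₀ (cs.takeWhile (fun c => c != ','))).map pvT := by
  rw [pvMachine_eq_pvNC]
  exact pvNC_eq_go _ []

-- comma-cut facts ------------------------------------------------------------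

lemma pv_takeWhile_append_comma (xs ys : List Char) (h : ',' ∈ xs) :
    (xs ++ ys).takeWhile (fun c => c != ',') = xs.takeWhile (fun c => c != ',') := by
  induction xs with
  | nil => simp at h
  | cons c rest ih =>
    by_cases hc : c = ','
    · subst hc
      simp [List.takeWhile_cons]
    · have hq : (c != ',') = true := by simp [bne_iff_ne, hc]
      have hr : ',' ∈ rest := by
        rcases List.mem_cons.mp h with h | h
        · exact absurd h.symm hc
        · exact h
      rw [List.cons_append, List.takeWhile_cons, List.takeWhile_cons, hq]
      simp only [if_true]
      rw [ih hr]

lemma pv_takeWhile_all (xs : List Char) (h : ',' ∉ xs) :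
    xs.takeWhile (fun c => c != ',') = xs := by
  apply List.takeWhile_eq_self_iff.mpr
  intro c hc
  simp only [bne_iff_ne, ne_eq]
  exact fun hcc => h (hcc ▸ hc)

lemma pvFcut_comma_cur (s rcur : List Char) (h : ',' ∈ rcur) :
    pvFcut (PySem.Chars.split₀.go s rcur [])
      = (if rcur.reverse.takeWhile (fun c => c != ',') = [] then []
         else [rcur.reverse.takeWhile (fun c => c != ',')]) := by
  induction s generalizing rcur with
  | nil =>
    rw [PySem.Chars.split₀.go]
    have hne : rcur ≠ [] := by rintro rfl; simp at h
    simp only [List.isEmpty_eq_false_iff.mpr hne, Bool.false_eq_true, if_false,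
      List.reverse_cons, List.reverse_nil, List.nil_append]
    simp only [pvFcut]
    have hmem : ',' ∈ rcur.reverse := List.mem_reverse.mpr h
    rw [if_pos hmem]
  | cons c rest ih =>
    rw [PySem.Chars.split₀.go]
    by_cases hs : PySem.Chars.isspace c = true
    · have hne : rcur ≠ [] := by rintro rfl; simp at h
      simp only [hs, if_true, List.isEmpty_eq_false_iff.mpr hne, Bool.false_eq_true, if_false]
      rw [pv_split_go_acc]
      simp only [List.reverse_cons, List.reverse_nil, List.nil_append, List.singleton_append]
      simp only [pvFcut]
      have hmem : ',' ∈ rcur.reverse := List.mem_reverse.mpr h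
      rw [if_pos hmem]
    · simp only [hs, Bool.false_eq_true, if_false]
      have h' : ',' ∈ c :: rcur := List.mem_cons_of_mem _ h
      rw [ih _ h']
      have hmem : ',' ∈ rcur.reverse := List.mem_reverse.mpr h
      rw [List.reverse_cons, pv_takeWhile_append_comma _ _ hmem]

lemma pv_split_cut (s rcur : List Char) (h : ',' ∉ rcur) :
    PySem.Chars.split₀.go (s.takeWhile (fun c => c != ',')) rcur []
      = pvFcut (PySem.Chars.split₀.go s rcur []) := by
  induction s generalizing rcur with
  | nil =>
    simp only [List.takeWhile_nil]
    rw [PySem.Chars.split₀.go]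
    by_cases hc : rcur.isEmpty = true
    · simp [hc, pvFcut]
    · simp only [hc, Bool.false_eq_true, if_false, List.reverse_cons, List.reverse_nil,
        List.nil_append]
      rw [pvFcut]
      have hmem : ',' ∉ rcur.reverse := fun hc' => h (List.mem_reverse.mp hc')
      rw [if_neg hmem, pvFcut]
  | cons c rest ih =>
    by_cases hc : c = ','
    · subst hc
      rw [List.takeWhile_cons]
      simp only [bne_self_eq_false, Bool.false_eq_true, if_false]
      conv_rhs => rw [PySem.Chars.split₀.go]
      have hs : PySem.Chars.isspace ',' = false := by decide
      simp only [hs, Bool.false_eq_true, if_false]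
      rw [pvFcut_comma_cur rest (',' :: rcur) (List.mem_cons_self ..)]
      have hmem : ',' ∉ rcur.reverse := fun hc' => h (List.mem_reverse.mp hc')
      have ht : (',' :: rcur).reverse.takeWhile (fun c => c != ',') = rcur.reverse := by
        rw [List.reverse_cons, List.takeWhile_append]
        rw [pv_takeWhile_all _ hmem]
        simp [List.takeWhile_cons]
      rw [ht, PySem.Chars.split₀.go]
      by_cases hne : rcur.isEmpty = true
      · rw [List.isEmpty_iff] at hne
        subst hne
        simp
      · have hne' : rcur ≠ [] := by simpa [List.isEmpty_iff] using hne
        simp [hne, hne']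
    · have hq : (c != ',') = true := by simp [bne_iff_ne, hc]
      rw [List.takeWhile_cons, hq]
      simp only [if_true]
      rw [PySem.Chars.split₀.go]
      conv_rhs => rw [PySem.Chars.split₀.go]
      by_cases hs : PySem.Chars.isspace c = true
      · by_cases hce : rcur.isEmpty = true
        · simp only [hs, hce, if_true]
          exact ih [] (by simp)
        · simp only [hs, hce, if_true, Bool.false_eq_true, if_false]
          rw [pv_split_go_acc, pv_split_go_acc rest]
          simp only [List.reverse_cons, List.reverse_nil, List.nil_append, List.singleton_append]
          rw [pvFcut]
          have hmem : ',' ∉ rcur.reverse := fun hc' => h (List.mem_reverse.mp hc')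
          rw [if_neg hmem, ih [] (by simp)]
      · simp only [hs, Bool.false_eq_true, if_false]
        refine ih (c :: rcur) ?_
        intro hmem
        rcases List.mem_cons.mp hmem with h' | h'
        · exact hc h'.symm
        · exact h h'

lemma pvFcut_map_pvT (l : List (List Char)) :
    (pvFcut l).map pvT = pvFcut (l.map pvT) := by
  induction l with
  | nil => rfl
  | cons w rest ih =>
    rw [List.map_cons, pvFcut, pvFcut]
    have hmem : ',' ∈ pvT w ↔ ',' ∈ w := pvTitleGo_mem_comma w false
    have htw : (pvT w).takeWhile (fun c => c != ',') = pvT (w.takeWhile (fun c => c != ',')) :=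
      pvTitleGo_takeWhile w false
    have hnil : (pvT w).takeWhile (fun c => c != ',') = [] ↔ w.takeWhile (fun c => c != ',') = [] := by
      rw [htw, pvT, pvTitleGo_eq_nil_iff]
    by_cases h : ',' ∈ w
    · rw [if_pos h, if_pos (hmem.mpr h)]
      by_cases h2 : w.takeWhile (fun c => c != ',') = []
      · rw [if_pos h2, if_pos (hnil.mpr h2)]
        rfl
      · rw [if_neg h2, if_neg (fun hc => h2 (hnil.mp hc))]
        simp [htw]
    · rw [if_neg h, if_neg (fun hc => h (hmem.mp hc))]
      simp only [List.map_cons, ih]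

lemma pvFcut_id (l : List (List Char)) (h : ∀ w ∈ l, ',' ∉ w) : pvFcut l = l := by
  induction l with
  | nil => rfl
  | cons w rest ih =>
    rw [pvFcut, if_neg (h w (List.mem_cons_self ..)), ih (fun x hx => h x (List.mem_cons_of_mem _ hx))]

lemma pvFcut_good (l : List (List Char)) (h : ∀ w ∈ l, pvGood w) : ∀ w ∈ pvFcut l, pvGood w := by
  induction l with
  | nil => simp [pvFcut]
  | cons w rest ih =>
    rw [pvFcut]
    by_cases hc : ',' ∈ w
    · rw [if_pos hc]
      by_cases h2 : w.takeWhile (fun c => c != ',') = []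
      · simp [h2]
      · rw [if_neg h2]
        intro x hx
        simp only [List.mem_singleton] at hx
        subst hx
        refine ⟨h2, ?_⟩
        intro d hd
        exact (h w (List.mem_cons_self ..)).2 d ((List.takeWhile_prefix _).sublist.subset hd)
    · rw [if_neg hc]
      intro x hx
      rcases List.mem_cons.mp hx with hx | hx
      · subst hx; exact h x (List.mem_cons_self ..)
      · exact ih (fun y hy => h y (List.mem_cons_of_mem _ hy)) x hx

-- strip facts ----------------------------------------------------------------

lemma pv_dropWhile_nonspace (u : List Char) (h : ∀ c ∈ u, PySem.Chars.isspace c = false) :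
    u.dropWhile PySem.Chars.isspace = u := by
  cases u with
  | nil => rfl
  | cons c t =>
    rw [List.dropWhile_cons, h c (List.mem_cons_self ..)]
    simp

lemma pv_rstrip_nonspace (u : List Char) (h : ∀ c ∈ u, PySem.Chars.isspace c = false) :
    PySem.Chars.rstrip u = u := by
  rw [PySem.Chars.rstrip, pv_dropWhile_nonspace _ (fun c hc => h c (List.mem_reverse.mp hc)),
    List.reverse_reverse]

lemma pv_lstrip_cons_nonspace (c : Char) (t : List Char) (h : PySem.Chars.isspace c = false) :
    PySem.Chars.lstrip (c :: t) = c :: t := by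
  rw [PySem.Chars.lstrip, List.dropWhile_cons, h]
  simp

lemma pv_rstrip_eq_nil_iff (u : List Char) :
    PySem.Chars.rstrip u = [] ↔ ∀ c ∈ u, PySem.Chars.isspace c = true := by
  rw [PySem.Chars.rstrip, List.reverse_eq_nil_iff, List.dropWhile_eq_nil_iff]
  constructor
  · intro h c hc
    exact h c (List.mem_reverse.mpr hc)
  · intro h c hc
    exact h c (List.mem_reverse.mp hc)

lemma pv_strip_nonspace (u : List Char) (h : ∀ c ∈ u, PySem.Chars.isspace c = false) :
    PySem.Chars.strip u = u := by
  rw [PySem.Chars.strip, PySem.Chars.lstrip, pv_dropWhile_nonspace u h, pv_rstrip_nonspace u h]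

lemma pv_rstrip_append (xs ys : List Char) :
    PySem.Chars.rstrip (xs ++ ys)
      = if PySem.Chars.rstrip ys = [] then PySem.Chars.rstrip xs else xs ++ PySem.Chars.rstrip ys := by
  rw [PySem.Chars.rstrip, List.reverse_append, List.dropWhile_append]
  by_cases h : (ys.reverse.dropWhile PySem.Chars.isspace) = []
  · have h2 : PySem.Chars.rstrip ys = [] := by rw [PySem.Chars.rstrip, h]; rfl
    simp only [h, List.isEmpty_nil, if_pos, h2, if_true, List.isEmpty_iff]
    rfl
  · have h2 : PySem.Chars.rstrip ys ≠ [] := by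
      rw [PySem.Chars.rstrip, ne_eq, List.reverse_eq_nil_iff]
      exact h
    rw [if_neg (by simpa [List.isEmpty_iff] using h), if_neg h2]
    rw [List.reverse_append, List.reverse_reverse, PySem.Chars.rstrip]

lemma pv_strip_cut_join (l : List (List Char)) (h : ∀ w ∈ l, pvGood w) :
    PySem.Chars.strip ((PySem.Chars.join [' '] l).takeWhile (fun c => c != ','))
      = PySem.Chars.join [' '] (pvFcut l) := by
  induction l with
  | nil =>
    rw [PySem.Chars.join_nil]
    simp only [List.takeWhile_nil]
    rw [pv_strip_nonspace [] (by simp), pvFcut, PySem.Chars.join_nil]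
  | cons w rest ih =>
    obtain ⟨hne, hns⟩ := h w (List.mem_cons_self ..)
    by_cases hcw : ',' ∈ w
    · -- the comma sits in the first word: everything from it on is cut
      have hstw : PySem.Chars.strip (w.takeWhile (fun c => c != ','))
          = w.takeWhile (fun c => c != ',') :=
        pv_strip_nonspace _ (fun c hc => hns c ((List.takeWhile_prefix _).sublist.subset hc))
      have hjoin : PySem.Chars.join [' '] (pvFcut (w :: rest))
          = w.takeWhile (fun c => c != ',') := by
        rw [pvFcut, if_pos hcw]
        by_cases h2 : w.takeWhile (fun c => c != ',') = []
        · rw [if_pos h2, PySem.Chars.join_nil, h2]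
        · rw [if_neg h2, PySem.Chars.join_singleton]
      rw [hjoin]
      cases rest with
      | nil => rw [PySem.Chars.join_singleton, hstw]
      | cons v rest' =>
        rw [PySem.Chars.join_cons_cons, List.append_assoc,
          pv_takeWhile_append_comma w _ hcw, hstw]
    · cases rest with
      | nil =>
        rw [PySem.Chars.join_singleton, pv_takeWhile_all w hcw, pv_strip_nonspace w hns,
          pvFcut, if_neg hcw, pvFcut, PySem.Chars.join_singleton]
      | cons v rest' =>
        obtain ⟨hvne, hvns⟩ := h v (List.mem_cons_of_mem _ (List.mem_cons_self ..))
        obtain ⟨cv, v', hv'⟩ : ∃ c t, v = c :: t := by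
          cases v with
          | nil => exact absurd rfl hvne
          | cons c t => exact ⟨c, t, rfl⟩
        have hcvns : PySem.Chars.isspace cv = false :=
          hvns cv (by rw [hv']; exact List.mem_cons_self ..)
        obtain ⟨s, hs⟩ : ∃ s, PySem.Chars.join [' '] (v :: rest') = v ++ s := by
          cases rest' with
          | nil => exact ⟨[], by rw [PySem.Chars.join_singleton, List.append_nil]⟩
          | cons u us =>
            exact ⟨[' '] ++ PySem.Chars.join [' '] (u :: us),
              by rw [PySem.Chars.join_cons_cons, List.append_assoc]⟩
        have htw : (w ++ [' '] ++ PySem.Chars.join [' '] (v :: rest')).takeWhile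
              (fun c => c != ',')
            = w ++ ' ' :: (PySem.Chars.join [' '] (v :: rest')).takeWhile (fun c => c != ',') := by
          rw [List.append_assoc, List.takeWhile_append, pv_takeWhile_all w hcw, if_pos rfl,
            List.singleton_append, List.takeWhile_cons]
          simp
        rw [PySem.Chars.join_cons_cons, htw]
        have hlst : ∀ u : List Char,
            PySem.Chars.strip (w ++ ' ' :: u) = PySem.Chars.rstrip (w ++ ' ' :: u) := by
          intro u
          obtain ⟨cw, w', hw'⟩ : ∃ c t, w = c :: t := by
            cases w with
            | nil => exact absurd rfl hne
            | cons c t => exact ⟨c, t, rfl⟩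
          rw [PySem.Chars.strip, hw', List.cons_append,
            pv_lstrip_cons_nonspace _ _ (hns cw (by rw [hw']; exact List.mem_cons_self ..))]
        rw [hlst]
        have hrs : w ++ ' ' :: (PySem.Chars.join [' '] (v :: rest')).takeWhile (fun c => c != ',')
            = (w ++ [' ']) ++ (PySem.Chars.join [' '] (v :: rest')).takeWhile (fun c => c != ',') := by
          simp
        rw [hrs, pv_rstrip_append]
        have hrw : PySem.Chars.rstrip (w ++ [' ']) = w := by
          rw [pv_rstrip_append, if_pos (by decide)]
          exact pv_rstrip_nonspace w hns
        by_cases hz : PySem.Chars.rstrip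
            ((PySem.Chars.join [' '] (v :: rest')).takeWhile (fun c => c != ',')) = []
        · rw [if_pos hz, hrw]
          by_cases hq : (cv != ',') = true
          · exfalso
            have hz' : (PySem.Chars.join [' '] (v :: rest')).takeWhile (fun c => c != ',')
                = cv :: (v' ++ s).takeWhile (fun c => c != ',') := by
              rw [hs, hv', List.cons_append, List.takeWhile_cons, hq]
              simp
            have hsp := (pv_rstrip_eq_nil_iff _).mp hz cv (by
              rw [hz']; exact List.mem_cons_self ..)
            rw [hcvns] at hsp
            exact Bool.false_ne_true hsp
          · have hcv : cv = ',' := by simpa [bne_iff_ne] using hq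
            have hfc : pvFcut (v :: rest') = [] := by
              rw [pvFcut, if_pos (by rw [hv', hcv]; exact List.mem_cons_self ..),
                if_pos (by rw [hv', hcv, List.takeWhile_cons]; simp)]
            rw [pvFcut, if_neg hcw, hfc, PySem.Chars.join_singleton]
        · rw [if_neg hz]
          have hzne : (PySem.Chars.join [' '] (v :: rest')).takeWhile (fun c => c != ',') ≠ [] := by
            rintro hzz
            rw [hzz] at hz
            exact hz (by rw [pv_rstrip_eq_nil_iff]; simp)
          have hq : (cv != ',') = true := by
            by_contra hq
            have hcv : cv = ',' := by simpa [bne_iff_ne] using hq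
            apply hzne
            rw [hs, hv', hcv, List.cons_append, List.takeWhile_cons]
            simp
          have hz' : (PySem.Chars.join [' '] (v :: rest')).takeWhile (fun c => c != ',')
              = cv :: (v' ++ s).takeWhile (fun c => c != ',') := by
            rw [hs, hv', List.cons_append, List.takeWhile_cons, hq]
            simp
          have hstripz : PySem.Chars.strip
                ((PySem.Chars.join [' '] (v :: rest')).takeWhile (fun c => c != ','))
              = PySem.Chars.rstrip
                ((PySem.Chars.join [' '] (v :: rest')).takeWhile (fun c => c != ',')) := by
            rw [PySem.Chars.strip, hz', pv_lstrip_cons_nonspace _ _ hcvns]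
          have hres : PySem.Chars.rstrip
                ((PySem.Chars.join [' '] (v :: rest')).takeWhile (fun c => c != ','))
              = PySem.Chars.join [' '] (pvFcut (v :: rest')) := by
            rw [← hstripz]
            exact ih (fun x hx => h x (List.mem_cons_of_mem _ hx))
          rw [hres]
          have hfne : pvFcut (v :: rest') ≠ [] := by
            intro hfe
            rw [hfe, PySem.Chars.join_nil] at hres
            exact hz hres
          obtain ⟨f, fs, hffs⟩ : ∃ f fs, pvFcut (v :: rest') = f :: fs := by
            cases hcc : pvFcut (v :: rest') with
            | nil => exact absurd hcc hfne
            | cons f fs => exact ⟨f, fs, rfl⟩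
          have hrhs : pvFcut (w :: v :: rest') = w :: pvFcut (v :: rest') := by
            rw [pvFcut, if_neg hcw]
          rw [hrhs, hffs, PySem.Chars.join_cons_cons]

-- splitOn head ---------------------------------------------------------------

lemma pv_splitOn_go_nil (sep : List Char) (fuel : Nat) (cur : List Char) (acc : List (List Char)) :
    PySem.Chars.splitOn.go sep (fuel + 1) [] cur acc = (cur.reverse :: acc).reverse := by
  rw [PySem.Chars.splitOn.go]
  omega

lemma pv_splitOn_go_acc (fuel : Nat) (l cur : List Char) (acc : List (List Char)) :
    PySem.Chars.splitOn.go [','] fuel l cur acc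
      = acc.reverse ++ PySem.Chars.splitOn.go [','] fuel l cur [] := by
  induction fuel generalizing l cur acc with
  | zero =>
    rw [PySem.Chars.splitOn.go]
    conv_rhs => rw [PySem.Chars.splitOn.go]
    cases l <;> simp
  | succ fuel ih =>
    cases l with
    | nil =>
      rw [pv_splitOn_go_nil, pv_splitOn_go_nil]
      simp
    | cons c rest =>
      rw [PySem.Chars.splitOn.go]
      conv_rhs => rw [PySem.Chars.splitOn.go]
      by_cases hp : List.isPrefixOf [','] (c :: rest) = true
      · simp only [hp, if_true]
        rw [ih _ _ (cur.reverse :: acc), ih _ _ [cur.reverse]]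
        simp
      · simp only [hp, Bool.false_eq_true, if_false]
        exact ih _ _ acc

lemma pv_splitOn_head (fuel : Nat) (l cur : List Char) (hf : l.length ≤ fuel) :
    ∃ tl, PySem.Chars.splitOn.go [','] fuel l cur []
      = (cur.reverse ++ l.takeWhile (fun c => c != ',')) :: tl := by
  induction fuel generalizing l cur with
  | zero =>
    have hl : l = [] := List.length_eq_zero_iff.mp (Nat.le_zero.mp hf)
    subst hl
    rw [PySem.Chars.splitOn.go]
    exact ⟨[], by simp⟩
  | succ fuel ih =>
    cases l with
    | nil =>
      rw [pv_splitOn_go_nil]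
      exact ⟨[], by simp⟩
    | cons c rest =>
      rw [PySem.Chars.splitOn.go]
      by_cases hc : c = ','
      · subst hc
        have hp : List.isPrefixOf [','] (',' :: rest) = true := by
          simp [List.isPrefixOf]
        simp only [hp, if_true]
        rw [pv_splitOn_go_acc]
        refine ⟨PySem.Chars.splitOn.go [','] fuel (List.drop 1 (',' :: rest)) [] [], ?_⟩
        rw [List.takeWhile_cons]
        simp
      · have hp : List.isPrefixOf [','] (c :: rest) = false := by
          simp [List.isPrefixOf, Ne.symm hc]
        simp only [hp, Bool.false_eq_true, if_false]
        obtain ⟨tl, htl⟩ := ih rest (c :: cur) (by simpa using Nat.le_of_succ_le_succ hf)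
        refine ⟨tl, ?_⟩
        rw [htl, List.takeWhile_cons]
        have hq : (c != ',') = true := by simp [bne_iff_ne, hc]
        simp [hq]

-- the character-level preprocessing theorems ---------------------------------

lemma pv_good_titled (cs : List Char) :
    ∀ w ∈ (PySem.Chars.split₀ cs).map pvT, pvGood w := by
  intro w hw
  obtain ⟨x, hx, hxe⟩ := List.mem_map.mp hw
  exact hxe ▸ pvGood_pvT x (pv_split_good cs x hx)

lemma pv_machine_fcut (cs : List Char) :
    pvMachine cs [] false = pvFcut ((PySem.Chars.split₀ cs).map pvT) := by
  rw [pvMachine_spec]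
  have h1 : PySem.Chars.split₀ (cs.takeWhile (fun c => c != ','))
      = pvFcut (PySem.Chars.split₀ cs) := by
    rw [PySem.Chars.split₀, PySem.Chars.split₀]
    exact pv_split_cut cs [] (by simp)
  rw [h1, pvFcut_map_pvT]

-- A's "name2" equals the space-join of B's machine words
lemma pv_n2 (cs : List Char) :
    (if PySem.Chars.isIn [','] (pvTitleGo (PySem.Chars.join [' '] (PySem.Chars.split₀ cs)) false) = true
     then PySem.Chars.strip
       ((pvTitleGo (PySem.Chars.join [' '] (PySem.Chars.split₀ cs)) false).takeWhile (fun c => c != ','))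
     else pvTitleGo (PySem.Chars.join [' '] (PySem.Chars.split₀ cs)) false)
    = PySem.Chars.join [' '] (pvMachine cs [] false) := by
  rw [pv_title_join, pv_machine_fcut]
  by_cases hc : PySem.Chars.isIn [','] (PySem.Chars.join [' '] ((PySem.Chars.split₀ cs).map pvT)) = true
  · rw [if_pos hc]
    exact pv_strip_cut_join _ (pv_good_titled cs)
  · rw [if_neg hc]
    have hmem : ',' ∉ PySem.Chars.join [' '] ((PySem.Chars.split₀ cs).map pvT) := by
      intro hm
      exact hc ((PySem.Chars.isIn_iff_infix _ _).mpr ((List.singleton_infix_iff ',' _).mpr hm))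
    have hfid : pvFcut ((PySem.Chars.split₀ cs).map pvT) = (PySem.Chars.split₀ cs).map pvT := by
      refine pvFcut_id _ ?_
      intro w hw hcw
      exact hmem ((pv_comma_mem_join _).mpr ⟨w, hw, hcw⟩)
    rw [hfid]

-- A's re-split of "name2" recovers exactly B's machine words
lemma pv_parts (cs : List Char) :
    PySem.Chars.split₀ (PySem.Chars.join [' '] (pvMachine cs [] false))
      = pvMachine cs [] false := by
  rw [pv_machine_fcut]
  exact pv_split_join _ (pvFcut_good _ (pv_good_titled cs))

-- String/Chars bridges for the final assembly --------------------------------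

lemma pv_join_str (l : List (List Char)) :
    PySem.Str.join " " (l.map String.ofList) = String.ofList (PySem.Chars.join [' '] l) := by
  rw [PySem.Str.join]
  congr 1
  rw [List.map_map]
  have h : (String.toList ∘ String.ofList) = (id : List Char → List Char) := by
    funext x; simp
  rw [h, List.map_id]
  rfl

lemma pv_head_split? (t : List Char) :
    ((PySem.Str.split? (String.ofList t) ",").getD []).headD ""
      = String.ofList (t.takeWhile (fun c => c != ',')) := by
  rw [PySem.Str.split?, String.toList_ofList]
  have hsep : PySem.Chars.split? t (",").toList = some (PySem.Chars.splitOn t [',']) := by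
    rw [PySem.Chars.split?]
    rfl
  rw [hsep]
  obtain ⟨tl, htl⟩ := pv_splitOn_head (t.length + 1) t [] (by omega)
  have hsplit : PySem.Chars.splitOn t [','] = (t.takeWhile (fun c => c != ',')) :: tl := by
    rw [PySem.Chars.splitOn]
    simpa using htl
  rw [Option.map_some, Option.getD_some, hsplit, List.map_cons, List.headD_cons]

-- the lookup part: A's scan = B's index --------------------------------------

lemma pvScanA_eq_none (nl : String) (tbl : List (String × List String))
    (h : ∀ p ∈ tbl, nl ∉ p.2.map PySem.Str.lower ∧ nl ≠ PySem.Str.lower p.1) :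
    pvScanA nl tbl = none := by
  induction tbl with
  | nil => rfl
  | cons p rest ih =>
    obtain ⟨h1, h2⟩ := h p (List.mem_cons_self ..)
    obtain ⟨c, vs⟩ := p
    simp only [pvScanA]
    rw [if_neg]
    · exact ih fun q hq => h q (List.mem_cons_of_mem _ hq)
    · simp_all

lemma pvInner_get?_none (nl c : String) (vs : List String) (d : PySem.Dict String String)
    (hd : d.get? nl = none) (h : ∀ v ∈ vs, nl ≠ PySem.Str.lower v) :
    (vs.foldl (fun d v => d.insert (PySem.Str.lower v) c) d).get? nl = none := by
  induction vs generalizing d with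
  | nil => exact hd
  | cons v rest ih =>
    refine ih _ ?_ fun w hw => h w (List.mem_cons_of_mem _ hw)
    rw [PySem.Dict.get?_insert_of_ne]
    · exact hd
    · exact h v (List.mem_cons_self ..)

lemma pvIndex_get?_none_aux (nl : String) (tbl : List (String × List String))
    (d : PySem.Dict String String) (hd : d.get? nl = none)
    (h : ∀ p ∈ tbl, nl ≠ PySem.Str.lower p.1 ∧ ∀ v ∈ p.2, nl ≠ PySem.Str.lower v) :
    (tbl.foldl
      (fun d p => p.2.foldl (fun d v => d.insert (PySem.Str.lower v) p.1)
                    (d.insert (PySem.Str.lower p.1) p.1)) d).get? nl = none := by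
  induction tbl generalizing d with
  | nil => exact hd
  | cons p rest ih =>
    obtain ⟨h1, h2⟩ := h p (List.mem_cons_self ..)
    refine ih _ ?_ fun q hq => h q (List.mem_cons_of_mem _ hq)
    refine pvInner_get?_none _ _ _ _ ?_ h2
    rw [PySem.Dict.get?_insert_of_ne]
    · exact hd
    · exact h1

set_option maxRecDepth 8192 in
lemma pvScanA_eq_get? (nl : String) : pvScanA nl pvRepl = PySem.Dict.get? pvIndex nl := by
  by_cases h : nl ∈ pvKeys
  · simp only [pvKeys, pvRepl, List.flatMap_cons, List.flatMap_nil, List.map_cons, List.map_nil,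
      List.cons_append, List.nil_append, List.mem_cons, List.not_mem_nil, or_false] at h
    rcases h with h | h | h | h | h | h | h | h | h | h | h | h | h | h | h | h | h | h | h | h |
      h | h | h | h | h | h | h | h | h | h | h | h | h | h | h | h | h | h | h | h |
      h | h | h | h | h | h | h | h | h | h | h | h | h | h | h | h | h | h | h | h |
      h | h | h | h | h | h | h | h <;> subst h <;> decide
  · have h1 : ∀ p ∈ pvRepl, nl ∉ p.2.map PySem.Str.lower ∧ nl ≠ PySem.Str.lower p.1 := by
      intro p hp
      refine ⟨fun hc => h (List.mem_flatMap.2 ⟨p, hp, by simp_all⟩),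
        fun hc => h (List.mem_flatMap.2 ⟨p, hp, by simp [hc]⟩)⟩
    have h2 : ∀ p ∈ pvRepl, nl ≠ PySem.Str.lower p.1 ∧ ∀ v ∈ p.2, nl ≠ PySem.Str.lower v := by
      intro p hp
      refine ⟨fun hc => h (List.mem_flatMap.2 ⟨p, hp, by simp [hc]⟩),
        fun v hv hc => h (List.mem_flatMap.2 ⟨p, hp, by
          simp only [List.mem_cons, List.mem_map]
          exact Or.inr ⟨v, hv, hc.symm⟩⟩)⟩
    rw [pvScanA_eq_none nl pvRepl h1, pvIndex,
      pvIndex_get?_none_aux nl pvRepl PySem.Dict.empty (PySem.Dict.get?_empty nl) h2]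

lemma pvFinish (nm : String) :
    pvLookupA nm = PySem.Dict.getD pvIndex (PySem.Str.lower nm) nm := by
  rw [pvLookupA, pvScanA_eq_get?, PySem.Dict.getD_eq_get?_getD]
  generalize PySem.Dict.get? pvIndex (PySem.Str.lower nm) = g
  cases g <;> rfl

-- the preprocessed strings agree ---------------------------------------------

lemma pv_name3 (name : String) :
    (let name1 := pvTitle (PySem.Str.join " " (PySem.Str.split₀ name))
     let name2 := if PySem.Str.isIn "," name1 then
         PySem.Str.strip (((PySem.Str.split? name1 ",").getD []).headD "") else name1
     let parts := PySem.Str.split₀ name2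
     if parts.length > 3 then PySem.Str.join " " (parts.take 2) else name2)
    = String.ofList (PySem.Chars.join [' ']
        (if (pvMachine name.toList [] false).length > 3
         then (pvMachine name.toList [] false).take 2 else pvMachine name.toList [] false)) := by
  have hname1 : pvTitle (PySem.Str.join " " (PySem.Str.split₀ name))
      = String.ofList (pvTitleGo (PySem.Chars.join [' '] (PySem.Chars.split₀ name.toList)) false) := by
    rw [show PySem.Str.split₀ name = (PySem.Chars.split₀ name.toList).map String.ofList from rfl,
      pv_join_str, pvTitle, String.toList_ofList]
  simp only [hname1]
  have hisin : PySem.Str.isIn ","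
        (String.ofList (pvTitleGo (PySem.Chars.join [' '] (PySem.Chars.split₀ name.toList)) false))
      = PySem.Chars.isIn [',']
        (pvTitleGo (PySem.Chars.join [' '] (PySem.Chars.split₀ name.toList)) false) := by
    rw [PySem.Str.isIn]
    simp [String.toList_ofList]
  have hname2 : (if PySem.Str.isIn ","
          (String.ofList (pvTitleGo (PySem.Chars.join [' '] (PySem.Chars.split₀ name.toList)) false)) then
        PySem.Str.strip (((PySem.Str.split?
          (String.ofList (pvTitleGo (PySem.Chars.join [' '] (PySem.Chars.split₀ name.toList)) false))
          ",").getD []).headD "")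
      else String.ofList (pvTitleGo (PySem.Chars.join [' '] (PySem.Chars.split₀ name.toList)) false))
      = String.ofList (PySem.Chars.join [' '] (pvMachine name.toList [] false)) := by
    rw [← pv_n2 name.toList]
    by_cases hc : PySem.Chars.isIn [',']
        (pvTitleGo (PySem.Chars.join [' '] (PySem.Chars.split₀ name.toList)) false) = true
    · rw [if_pos (by rw [hisin]; exact hc), if_pos hc, pv_head_split?, PySem.Str.strip,
        String.toList_ofList]
    · rw [if_neg (by rw [hisin]; exact hc), if_neg hc]
  rw [hname2]
  have hparts : PySem.Str.split₀
        (String.ofList (PySem.Chars.join [' '] (pvMachine name.toList [] false)))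
      = (pvMachine name.toList [] false).map String.ofList := by
    rw [show ∀ s : String, PySem.Str.split₀ s = (PySem.Chars.split₀ s.toList).map String.ofList
        from fun _ => rfl]
    rw [String.toList_ofList, pv_parts]
  rw [hparts, List.length_map]
  by_cases hl : (pvMachine name.toList [] false).length > 3
  · rw [if_pos hl, if_pos hl, ← List.map_take, pv_join_str]
  · rw [if_neg hl, if_neg hl]

-- ===== VERDICT (by name: the statement is the Claim_ definition above) =====
theorem normalize_person_name_spec : Claim_equal_normalize_person_name := by
  intro name _
  unfold Spec_normalize_person_name normalize_person_name normalize_person_name_alt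
  rw [pvFinish, pv_name3 name]
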